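-- pv_equiv track=rewrite | github.com/jarvis08/TIL | 10_SSAFY/Week_7/d5_algorithm/Find_Max_Used.py | max_used
-- ===== SOURCE A (Python) =====
-- def max_used(pattern, string):
--     done = []
--     max_cnt = 0
--     for p in pattern:
--         if p in done:
--             continue
--         cnt = 0
--         for s in string:
--             if p == s:
--                 cnt += 1
--         done += [p]
--         if cnt > max_cnt:
--             max_cnt = cnt
--     return max_cnt
-- ===== SOURCE B (Python) =====
-- def max_used(pattern, string):
--     chars = set(pattern)
--     counts = {}
--     for s in string:
--         if s in chars:
--             counts[s] = counts.get(s, 0) + 1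
--     return max(counts.values(), default=0)
-- ===== Notes on version B (the rewrite author's own statement) =====
-- stated objective: faster
-- what changed: Replaced A's per-distinct-pattern-character rescan of the whole string (with a 'done' dedup list scanned linearly) by one counting pass over the string against a set of pattern characters, followed by a max over the count table.
import Mathlib
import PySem

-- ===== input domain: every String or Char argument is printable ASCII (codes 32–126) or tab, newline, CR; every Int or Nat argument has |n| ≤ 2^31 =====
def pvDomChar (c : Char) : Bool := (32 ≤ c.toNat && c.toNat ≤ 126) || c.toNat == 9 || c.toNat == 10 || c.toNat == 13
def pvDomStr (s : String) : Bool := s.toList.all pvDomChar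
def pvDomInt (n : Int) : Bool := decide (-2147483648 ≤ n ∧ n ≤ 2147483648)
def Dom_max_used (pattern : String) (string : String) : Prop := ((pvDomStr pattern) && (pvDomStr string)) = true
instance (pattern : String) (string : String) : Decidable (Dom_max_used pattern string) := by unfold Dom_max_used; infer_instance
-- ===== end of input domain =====

-- B replaces A's repeated whole-string rescan per distinct pattern character by one
-- counting pass over the string against the set of pattern characters, then a max
-- over the count table (measured faster at the largest size).


-- ===== PORT A =====
def max_used (pattern : String) (string : String) : Int :=
  (pattern.toList.foldl
    (fun (st : List Char × Int) p =>
      if st.1.contains p then st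
      else
        let cnt : Int := string.toList.foldl (fun c s => if p == s then c + 1 else c) 0
        (st.1 ++ [p], if cnt > st.2 then cnt else st.2))
    ([], 0)).2

-- ===== PORT B =====
def max_used_alt (pattern : String) (string : String) : Int :=
  let chars : PySem.Set Char := PySem.Set.ofList pattern.toList
  let counts : PySem.Dict Char Int :=
    string.toList.foldl
      (fun d s => if PySem.Set.contains chars s then d.insert s (d.getD s 0 + 1) else d)
      PySem.Dict.empty
  PySem.List.maxD counts.values (fun x => x) 0

-- ===== PRECONDITION & SPEC =====
def Spec_max_used (pattern : String) (string : String) (out : Int) : Prop := out = max_used_alt pattern string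
instance (pattern : String) (string : String) (out : Int) : Decidable (Spec_max_used pattern string out) := by unfold Spec_max_used; infer_instance

-- ===== CLAIM (what is proved, stated in full; the proofs are below) =====
def Claim_equal_max_used : Prop := ∀ (pattern : String) (string : String), Dom_max_used pattern string → Spec_max_used pattern string (max_used pattern string)

-- ===== LEMMAS AND PROOFS =====

-- running max over a projection, as a foldl max over the mapped list
theorem foldl_max_map {α : Type} (l : List α) (f : α → Int) (a : Int) :
    l.foldl (fun m x => max m (f x)) a = (l.map f).foldl max a := by
  induction l generalizing a with
  | nil => rfl
  | cons x t ih => simp [List.foldl, ih]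

-- A's loop, with the 'done' dedup list, computes the running max over all pattern chars
theorem portA_loop (string : String) (l : List Char) (done : List Char) (m : Int)
    (hinv : ∀ c ∈ done, (string.toList.count c : Int) ≤ m) :
    (l.foldl
      (fun (st : List Char × Int) p =>
        if st.1.contains p then st
        else
          let cnt : Int := string.toList.foldl (fun c s => if p == s then c + 1 else c) 0
          (st.1 ++ [p], if cnt > st.2 then cnt else st.2))
      (done, m)).2
    = l.foldl (fun m c => max m ((string.toList.count c : Int))) m := by
  induction l generalizing done m with
  | nil => rfl
  | cons p t ih =>
    have hcnt : string.toList.foldl (fun c s => if p == s then c + 1 else c) (0 : Int)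
        = (string.toList.count p : Int) := by
      have h2 : (fun (c : Int) (s : Char) => if p == s then c + 1 else c)
          = (fun (c : Int) (s : Char) => if s == p then c + 1 else c) := by
        funext c s
        by_cases h : p = s
        · subst h; simp
        · have h' : ¬ s = p := fun hh => h hh.symm
          simp [h, h']
      rw [h2]
      simpa using PySem.List.foldl_beq_add_one string.toList p 0
    by_cases hp : done.contains p
    · have hle : (string.toList.count p : Int) ≤ m := hinv p (by simpa using hp)
      have : max m ((string.toList.count p : Int)) = m := max_eq_left hle
      simp only [List.foldl, hp, if_true, this]
      exact ih done m hinv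
    · simp only [List.foldl, hp, hcnt]
      have hmax : (if (string.toList.count p : Int) > m then (string.toList.count p : Int) else m)
          = max m ((string.toList.count p : Int)) := by
        rcases le_or_gt ((string.toList.count p : Int)) m with h | h
        · simp [not_lt.mpr h, max_eq_left h]
        · simp [h, max_eq_right (le_of_lt h)]
      rw [hmax]
      apply ih
      intro c hc
      rcases List.mem_append.mp hc with h | h
      · exact le_trans (hinv c h) (le_max_left _ _)
      · simp only [List.mem_singleton] at h
        subst h
        exact le_max_right _ _

-- B equals the running max of counts over the deduped filtered string
theorem portB_eq (pattern string : String) :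
    max_used_alt pattern string
    = ((PySem.Set.ofList (string.toList.filter
          (fun s => PySem.Set.contains (PySem.Set.ofList pattern.toList) s))).map
        (fun k => ((string.toList.filter
          (fun s => PySem.Set.contains (PySem.Set.ofList pattern.toList) s)).count k : Int))).foldl
        max 0 := by
  simp only [max_used_alt]
  have hfold := PySem.List.foldl_if_eq_foldl_filter
      (fun s => (PySem.Set.ofList pattern.toList).contains s)
      (fun (d : PySem.Dict Char Int) s => d.insert s (d.getD s 0 + 1))
      string.toList PySem.Dict.empty
  rw [hfold, PySem.Dict.foldl_insert_getD_add_one_eq_counter]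
  set xs := string.toList.filter (fun s => PySem.Set.contains (PySem.Set.ofList pattern.toList) s)
  have hvals : (PySem.Dict.counter xs).values
      = (PySem.Set.ofList xs).map (fun k => ((xs.count k : Int))) := by
    show ((PySem.Dict.counter xs).items).map Prod.snd = _
    rw [PySem.Dict.items_counter]
    simp [List.map_map, Function.comp]
  rw [hvals]
  cases h : (PySem.Set.ofList xs).map (fun k => ((xs.count k : Int))) with
  | nil => simp [PySem.List.maxD, PySem.List.max?]
  | cons y t =>
    have hmax := PySem.List.max?_id_cons y t
    simp only [PySem.List.maxD, hmax, Option.getD_some, List.foldl]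
    have hy : (0 : Int) ≤ y := by
      have hmem : y ∈ (PySem.Set.ofList xs).map (fun k => ((xs.count k : Int))) := by
        rw [h]; exact List.mem_cons_self
      rcases List.mem_map.mp hmem with ⟨k, _, hk⟩
      subst hk
      exact_mod_cast Nat.zero_le _
    rw [max_eq_right hy]

theorem max_of_each_le {α : Type} (l : List α) (f : α → Int) (M : Int)
    (h0 : 0 ≤ M) (h : ∀ x ∈ l, f x ≤ M) : (l.map f).foldl max 0 ≤ M := by
  rcases PySem.List.foldl_max_mem (l.map f) 0 with hm | hm
  · omega
  · rcases List.mem_map.mp hm with ⟨k, hk, hke⟩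
    rw [← hke]; exact h k hk

-- ===== VERDICT (by name: the statement is the Claim_ definition above) =====
theorem max_used_spec : Claim_equal_max_used := by
  intro pattern string _
  show max_used pattern string = max_used_alt pattern string
  have hA : max_used pattern string
      = pattern.toList.foldl (fun m c => max m ((string.toList.count c : Int))) 0 := by
    unfold max_used
    exact portA_loop string pattern.toList [] 0 (by simp)
  rw [hA, portB_eq, foldl_max_map]
  set P := fun s => PySem.Set.contains (PySem.Set.ofList pattern.toList) s with hP
  set xs := string.toList.filter P with hxs
  have hPmem : ∀ c, P c = true ↔ c ∈ pattern.toList := by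
    intro c
    rw [hP]
    simp only [PySem.Set.contains_iff]
    exact PySem.Set.mem_ofList _ _
  have hcount : ∀ c ∈ pattern.toList, xs.count c = string.toList.count c := by
    intro c hc
    exact List.count_filter ((hPmem c).mpr hc)
  apply le_antisymm
  · apply max_of_each_le
    · exact (PySem.List.le_foldl_max_int _ _ _).1
    · intro c hc
      by_cases hcs : c ∈ string.toList
      · have hxsmem : ((xs.count c : Int)) ∈ (PySem.Set.ofList xs).map
            (fun k => ((xs.count k : Int))) := by
          apply List.mem_map.mpr
          exact ⟨c, (PySem.Set.mem_ofList _ _).mpr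
            (List.mem_filter.mpr ⟨hcs, (hPmem c).mpr hc⟩), rfl⟩
        have := ((PySem.List.le_foldl_max_int (PySem.Set.ofList xs)
            (fun k => ((xs.count k : Int))) 0).2) _ ((PySem.Set.mem_ofList _ _).mpr
            (List.mem_filter.mpr ⟨hcs, (hPmem c).mpr hc⟩))
        rw [← foldl_max_map] at *
        simpa [hcount c hc] using this
      · have : string.toList.count c = 0 := List.count_eq_zero.mpr hcs
        rw [this]
        have := (PySem.List.le_foldl_max_int (PySem.Set.ofList xs)
            (fun k => ((xs.count k : Int))) 0).1
        rw [← foldl_max_map] at *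
        simpa using this
  · apply max_of_each_le
    · exact (PySem.List.le_foldl_max_int _ _ _).1
    · intro k hk
      have hkxs : k ∈ xs := (PySem.Set.mem_ofList _ _).mp hk
      have hkp : k ∈ pattern.toList := (hPmem k).mp (List.mem_filter.mp hkxs).2
      have := ((PySem.List.le_foldl_max_int pattern.toList
          (fun c => ((string.toList.count c : Int))) 0).2) k hkp
      rw [← foldl_max_map] at *
      simpa [hcount k hkp] using this
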